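-- pv_equiv track=rewrite | github.com/pypi-data/pypi-mirror-391 | packages/brs-xss/brs_xss-2.1.1.tar.gz/brs_xss-2.1.1/brsxss/core/javascript_context_detector.py | _is_in_js_string
-- ===== SOURCE A (Python) =====
-- def _is_in_js_string(html_content: str, pos: int, marker: str) -> bool:
--     """Check if position is inside JavaScript string"""
--     # Get context around position
--     start = max(0, pos - 100)
--     end = min(len(html_content), pos + len(marker) + 100)
--     context = html_content[start:end]
--
--     # Find marker in context
--     marker_in_context = context.find(marker)
--     if marker_in_context == -1:
--         return False
--
--     # Count quotes before marker (excluding escaped quotes)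
--     before_marker = context[:marker_in_context]
--
--     # Count unescaped single quotes
--     single_quotes = 0
--     i = 0
--     while i < len(before_marker):
--         if before_marker[i] == "'" and (i == 0 or before_marker[i-1] != '\\'):
--             single_quotes += 1
--         i += 1
--
--     # Count unescaped double quotes
--     double_quotes = 0
--     i = 0
--     while i < len(before_marker):
--         if before_marker[i] == '"' and (i == 0 or before_marker[i-1] != '\\'):
--             double_quotes += 1
--         i += 1
--
--     # If odd number of quotes, we're inside a string
--     return (single_quotes % 2 == 1) or (double_quotes % 2 == 1)
-- ===== SOURCE B (Python) =====
-- def _is_in_js_string(html_content: str, pos: int, marker: str) -> bool: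
--     """Check if position is inside JavaScript string (single-pass parity scan)"""
--     start = max(0, pos - 100)
--     end = min(len(html_content), pos + len(marker) + 100)
--     context = html_content[start:end]
--
--     idx = context.find(marker)
--     if idx == -1:
--         return False
--
--     # One pass over the text before the marker, toggling a parity flag per
--     # unescaped quote while remembering the previous character.
--     odd_single = False
--     odd_double = False
--     prev = None
--     for ch in context[:idx]:
--         if prev != '\\':
--             if ch == "'":
--                 odd_single = not odd_single
--             elif ch == '"':
--                 odd_double = not odd_double
--         prev = ch
--     return odd_single or odd_double
-- ===== Notes on version B (the rewrite author's own statement) =====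
-- stated objective: alternative
-- what changed: The two sequential index-based while-loops that separately count unescaped single and double quotes are replaced by one structural pass over the prefix that remembers the previous character and toggles a parity flag per quote kind, so no counters and no second scan are kept.
import Mathlib
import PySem

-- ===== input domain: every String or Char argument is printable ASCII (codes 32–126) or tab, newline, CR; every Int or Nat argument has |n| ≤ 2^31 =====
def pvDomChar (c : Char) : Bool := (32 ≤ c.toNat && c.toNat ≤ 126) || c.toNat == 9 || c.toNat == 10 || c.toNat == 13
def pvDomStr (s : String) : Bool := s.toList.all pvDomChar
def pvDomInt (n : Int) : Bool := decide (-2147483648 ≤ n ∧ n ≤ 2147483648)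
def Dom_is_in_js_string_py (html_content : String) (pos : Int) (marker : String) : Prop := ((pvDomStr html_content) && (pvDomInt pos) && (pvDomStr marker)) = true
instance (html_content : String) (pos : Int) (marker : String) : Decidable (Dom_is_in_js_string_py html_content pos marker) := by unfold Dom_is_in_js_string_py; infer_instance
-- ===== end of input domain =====

-- B replaces A's two separate quote-counting while-loops by one pass toggling parity flags; objective: alternative decomposition, same cost.

-- ===== PORT A =====
-- A's while-loop 'i = 0; while i < len(before): if before[i] == q and (i == 0 or before[i-1] != '\\'): c += 1; i += 1'
def countUnescaped (before : List Char) (q : Char) : Nat :=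
  (List.range before.length).foldl
    (fun c i => if before.getD i ' ' = q ∧ (i = 0 ∨ before.getD (i - 1) ' ' ≠ '\\') then c + 1 else c) 0

def is_in_js_string_py (html_content : String) (pos : Int) (marker : String) : Bool :=
  let h := html_content.toList
  let m := marker.toList
  let start := max 0 (pos - 100)
  let stop := min (h.length : Int) (pos + m.length + 100)
  let context := PySem.List.slice h (some start) (some stop)
  let marker_in_context := PySem.Chars.find context m
  if marker_in_context = -1 then false
  else
    let before := PySem.List.slice context none (some marker_in_context)
    let single_quotes := countUnescaped before '\''
    let double_quotes := countUnescaped before '"'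
    decide (single_quotes % 2 = 1) || decide (double_quotes % 2 = 1)

-- ===== PORT B =====
-- B's loop body: given (odd_single, odd_double, prev) and the next char, toggle the matching parity unless escaped
def scanStep (st : Bool × Bool × Option Char) (ch : Char) : Bool × Bool × Option Char :=
  let (s, d, prev) := st
  if prev ≠ some '\\' then
    if ch = '\'' then (!s, d, some ch)
    else if ch = '"' then (s, !d, some ch)
    else (s, d, some ch)
  else (s, d, some ch)

def is_in_js_string_py_alt (html_content : String) (pos : Int) (marker : String) : Bool :=
  let h := html_content.toList
  let m := marker.toList
  let start := max 0 (pos - 100)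
  let stop := min (h.length : Int) (pos + m.length + 100)
  let context := PySem.List.slice h (some start) (some stop)
  let idx := PySem.Chars.find context m
  if idx = -1 then false
  else
    let st := (PySem.List.slice context none (some idx)).foldl scanStep (false, false, none)
    st.1 || st.2.1

-- ===== PRECONDITION & SPEC =====
def Spec_is_in_js_string_py (html_content : String) (pos : Int) (marker : String) (out : Bool) : Prop := out = is_in_js_string_py_alt html_content pos marker
instance (html_content : String) (pos : Int) (marker : String) (out : Bool) : Decidable (Spec_is_in_js_string_py html_content pos marker out) := by unfold Spec_is_in_js_string_py; infer_instance

-- ===== CLAIM (what is proved, stated in full; the proofs are below) =====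
def Claim_equal_is_in_js_string_py : Prop := ∀ (html_content : String) (pos : Int) (marker : String), Dom_is_in_js_string_py html_content pos marker → Spec_is_in_js_string_py html_content pos marker (is_in_js_string_py html_content pos marker)

-- ===== LEMMAS AND PROOFS =====

-- common intermediate: number of occurrences of q not preceded by a backslash, with virtual predecessor prev
def countFrom (prev : Option Char) (l : List Char) (q : Char) : Nat :=
  match l with
  | [] => 0
  | c :: t => (if prev ≠ some '\\' ∧ c = q then 1 else 0) + countFrom (some c) t q

theorem foldl_count (p : Nat → Prop) [DecidablePred p] (xs : List Nat) (n : Nat) :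
    xs.foldl (fun c i => if p i then c + 1 else c) n = n + xs.countP (fun i => decide (p i)) := by
  induction xs generalizing n with
  | nil => simp
  | cons x t ih => by_cases h : p x <;> simp [h, ih] <;> omega

theorem countUnescaped_eq (l : List Char) (q : Char) (prev : Option Char) :
    (List.range l.length).countP
      (fun i => decide (l.getD i ' ' = q ∧ (if i = 0 then prev ≠ some '\\' else l.getD (i - 1) ' ' ≠ '\\'))) =
    countFrom prev l q := by
  induction l generalizing prev with
  | nil => simp [countFrom]
  | cons c t ih =>
    rw [List.length_cons, List.range_succ_eq_map, List.countP_cons, List.countP_map]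
    have hcongr : ((List.range t.length).countP
        ((fun i => decide ((c :: t).getD i ' ' = q ∧ (if i = 0 then prev ≠ some '\\' else (c :: t).getD (i - 1) ' ' ≠ '\\'))) ∘ Nat.succ)) =
        (List.range t.length).countP
        (fun i => decide (t.getD i ' ' = q ∧ (if i = 0 then some c ≠ some '\\' else t.getD (i - 1) ' ' ≠ '\\'))) := by
      apply List.countP_congr
      intro i _
      cases i with
      | zero => simp
      | succ j => simp
    rw [hcongr, ih (some c)]
    simp only [countFrom, List.getD_cons_zero]
    by_cases h1 : prev ≠ some '\\' ∧ c = q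
    · have h2 : c = q ∧ prev ≠ some '\\' := ⟨h1.2, h1.1⟩
      simp [h1]
      omega
    · have h2 : ¬ (c = q ∧ prev ≠ some '\\') := fun ⟨a, b⟩ => h1 ⟨b, a⟩
      simp [h1, h2]

theorem countUnescaped_eq_countFrom (l : List Char) (q : Char) :
    countUnescaped l q = countFrom none l q := by
  unfold countUnescaped
  rw [foldl_count, Nat.zero_add, ← countUnescaped_eq l q none]
  apply List.countP_congr
  intro i _
  cases i <;> simp

theorem xor_parity (s : Bool) (P : Prop) [Decidable P] (n : Nat) :
    xor (xor s (decide P)) (decide (n % 2 = 1)) =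
    xor s (decide (((if P then 1 else 0) + n) % 2 = 1)) := by
  by_cases h : P
  · rcases Nat.mod_two_eq_zero_or_one n with h2 | h2 <;>
      · have h3 : (1 + n) % 2 = 1 - n % 2 := by omega
        simp [h, h2, h3]
  · simp [h]

theorem scan_eq (l : List Char) (s d : Bool) (prev : Option Char) :
    l.foldl scanStep (s, d, prev) =
      ((xor s (decide (countFrom prev l '\'' % 2 = 1))),
       (xor d (decide (countFrom prev l '"' % 2 = 1))),
       l.foldl (fun _ c => some c) prev) := by
  induction l generalizing s d prev with
  | nil => simp [countFrom]
  | cons c t ih =>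
    rw [List.foldl_cons, List.foldl_cons]
    have hstep : scanStep (s, d, prev) c =
        ((xor s (decide (prev ≠ some '\\' ∧ c = '\''))),
         (xor d (decide (prev ≠ some '\\' ∧ c = '"'))), some c) := by
      unfold scanStep
      by_cases hp : prev = some '\\'
      · simp [hp]
      · by_cases h1 : c = '\''
        · simp [hp, h1]
        · by_cases h2 : c = '"' <;> simp [hp, h1, h2]
    rw [hstep, ih]
    simp only [countFrom, Prod.mk.injEq]
    exact ⟨xor_parity .., xor_parity .., trivial⟩

-- ===== VERDICT (by name: the statement is the Claim_ definition above) =====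
theorem is_in_js_string_py_spec : Claim_equal_is_in_js_string_py := by
  intro html_content pos marker _
  unfold Spec_is_in_js_string_py is_in_js_string_py is_in_js_string_py_alt
  simp only
  split
  · rfl
  · rw [scan_eq]
    simp [countUnescaped_eq_countFrom]
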